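-- pv_equiv track=rewrite | github.com/guilherme-nsr/beecrowd-sol | 1234.py | dancante
-- ===== SOURCE A (Python) =====
-- def dancante(texto):
--     resultado = str()
--
--     espacos = 0
--
--     for i in range(len(texto)):
--         char = texto[i]
--
--         if char == ' ':
--             resultado += ' '
--             espacos += 1
--             continue
--
--         if (i - espacos) % 2 == 0:
--             char = char.upper()
--
--         else:
--             char = char.lower()
--
--         resultado += char
--
--     return resultado
-- ===== SOURCE B (Python) =====
-- def dancante(texto):
--     # pass 1: case the non-space characters by their index among non-spaces
--     cased = [c.upper() if i % 2 == 0 else c.lower()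
--              for i, c in enumerate([ch for ch in texto if ch != ' '])]
--     it = iter(cased)
--     # pass 2: restore spaces at their original positions
--     return ''.join(' ' if ch == ' ' else next(it) for ch in texto)
-- ===== Notes on version B (the rewrite author's own statement) =====
-- stated objective: alternative
-- what changed: Replaces the single index/space-counter scan with two passes: first build a cased list of the non-space characters via enumerate parity, then a merge pass that re-inserts spaces at their original positions and pulls cased characters from an iterator.
import Mathlib
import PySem

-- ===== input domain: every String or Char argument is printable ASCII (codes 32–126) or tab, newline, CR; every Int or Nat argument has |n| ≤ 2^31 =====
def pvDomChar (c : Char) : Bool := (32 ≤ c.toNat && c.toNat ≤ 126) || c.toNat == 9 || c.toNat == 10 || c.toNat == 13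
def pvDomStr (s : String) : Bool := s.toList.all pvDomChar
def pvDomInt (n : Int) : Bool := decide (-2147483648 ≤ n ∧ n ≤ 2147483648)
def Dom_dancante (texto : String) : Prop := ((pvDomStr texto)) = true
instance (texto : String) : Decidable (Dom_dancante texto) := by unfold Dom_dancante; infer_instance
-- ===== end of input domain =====

-- B replaces A's indexed scan with a space counter by two passes: case the
-- non-space characters by enumerate parity, then merge spaces back (objective: alternative).

-- ===== PORT A =====
-- the for-loop over range(len(texto)) as tail recursion on the char list,
-- carrying the running index i, the accumulated resultado and espacos
def dancanteGo : List Char → Int → List Char → Int → List Char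
  | [], _, resultado, _ => resultado
  | c :: rest, i, resultado, espacos =>
    if c = ' ' then
      dancanteGo rest (i + 1) (resultado ++ [' ']) (espacos + 1)
    else
      let c' := if PySem.Int.mod (i - espacos) 2 = 0
                then PySem.Chars.upperChar c else PySem.Chars.lowerChar c
      dancanteGo rest (i + 1) (resultado ++ [c']) espacos

def dancante (texto : String) : String :=
  String.mk (dancanteGo texto.toList 0 [] 0)

-- ===== PORT B =====
-- pass 1: cased list of the non-space characters by enumerate-index parity
def dancanteCased (texto : String) : List Char :=
  (PySem.List.enumerate (texto.toList.filter (fun c => c ≠ ' ')) 0).map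
    (fun p => if PySem.Int.mod p.1 2 = 0
              then PySem.Chars.upperChar p.2 else PySem.Chars.lowerChar p.2)

-- pass 2: spaces stay, other positions consume the next cased character
def dancanteMerge : List Char → List Char → List Char
  | [], _ => []
  | c :: rest, cased =>
    if c = ' ' then ' ' :: dancanteMerge rest cased
    else match cased with
         | [] => []          -- iterator never under-runs on real inputs
         | x :: xs => x :: dancanteMerge rest xs

def dancante_alt (texto : String) : String :=
  String.mk (dancanteMerge texto.toList (dancanteCased texto))

-- ===== PRECONDITION & SPEC =====
def Spec_dancante (texto : String) (out : String) : Prop := out = dancante_alt texto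
instance (texto : String) (out : String) : Decidable (Spec_dancante texto out) := by unfold Spec_dancante; infer_instance

-- ===== CLAIM (what is proved, stated in full; the proofs are below) =====
def Claim_equal_dancante : Prop := ∀ (texto : String), Dom_dancante texto → Spec_dancante texto (dancante texto)

-- ===== LEMMAS AND PROOFS =====
def dancanteCase (p : Int × Char) : Char :=
  if PySem.Int.mod p.1 2 = 0 then PySem.Chars.upperChar p.2 else PySem.Chars.lowerChar p.2

theorem dancanteGo_merge (cs : List Char) :
    ∀ (i espacos : Int) (resultado : List Char),
      dancanteGo cs i resultado espacos =
        resultado ++ dancanteMerge cs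
          ((PySem.List.enumerate (cs.filter (fun c => c ≠ ' ')) (i - espacos)).map dancanteCase) := by
  induction cs with
  | nil => intro i espacos resultado; simp [dancanteGo, dancanteMerge]
  | cons c rest ih =>
    intro i espacos resultado
    by_cases hc : c = ' '
    · subst hc
      simp only [dancanteGo, dancanteMerge, List.filter_cons,
        decide_eq_true_eq, ite_not]
      rw [ih]
      have : i + 1 - (espacos + 1) = i - espacos := by ring
      rw [this]
      simp
    · simp only [dancanteGo, dancanteMerge, if_neg hc, List.filter_cons,
        decide_eq_true_eq, if_pos hc, PySem.List.enumerate_cons, List.map_cons]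
      rw [ih]
      have : i - espacos + 1 = i + 1 - espacos := by ring
      rw [this]
      simp [dancanteCase]

-- ===== VERDICT (by name: the statement is the Claim_ definition above) =====
theorem dancante_spec : Claim_equal_dancante := by
  intro texto _
  unfold Spec_dancante dancante dancante_alt dancanteCased
  rw [dancanteGo_merge]
  show String.mk ([] ++ _) = _
  rw [List.nil_append]
  rfl
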